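-- pv_equiv track=rewrite | github.com/TopeEstLa/nsi-epreuves-pratiques | BCG_NSI_16.py | recherche_indices_classement
-- ===== SOURCE A (Python) =====
-- def recherche_indices_classement(value, tab):
--     """
--     Retourne les indices des éléments inférieurs, égaux et supérieurs à value.
--     :param value:
--     :param tab:
--     :return: tuple contenant les indices des éléments inférieurs, égaux et supérieurs à value
--     """
--     inf = []
--     equals = []
--     sup = []
--     for i in range(len(tab)):
--         if tab[i] < value:
--             inf.append(i)
--         elif tab[i] == value:
--             equals.append(i)
--         else:
--             sup.append(i)
--
--     return inf, equals, sup
-- ===== SOURCE B (Python) =====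
-- def recherche_indices_classement(value, tab):
--     inf = [i for i, x in enumerate(tab) if x < value]
--     equals = [i for i, x in enumerate(tab) if x == value]
--     sup = [i for i, x in enumerate(tab) if x > value]
--     return inf, equals, sup
-- ===== Notes on version B (the rewrite author's own statement) =====
-- stated objective: idiomatic
-- what changed: Replaces the single index loop with three mutating accumulators by three independent list comprehensions over enumerate, one per bucket.
import Mathlib
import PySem

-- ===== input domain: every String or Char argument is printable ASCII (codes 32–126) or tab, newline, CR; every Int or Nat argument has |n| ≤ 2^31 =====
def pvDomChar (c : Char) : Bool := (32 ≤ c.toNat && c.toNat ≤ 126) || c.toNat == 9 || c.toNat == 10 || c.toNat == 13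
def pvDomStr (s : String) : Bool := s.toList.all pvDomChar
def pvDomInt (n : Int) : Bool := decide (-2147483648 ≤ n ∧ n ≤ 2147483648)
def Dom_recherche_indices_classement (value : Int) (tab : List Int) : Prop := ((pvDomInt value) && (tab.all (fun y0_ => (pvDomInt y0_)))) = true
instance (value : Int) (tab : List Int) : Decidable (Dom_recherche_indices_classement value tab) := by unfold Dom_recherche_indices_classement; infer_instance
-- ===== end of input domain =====

-- B replaces A's single branching index loop by three independent list comprehensions over enumerate (one bucket each); same O(n) cost, more idiomatic.


-- ===== PORT A =====
-- 'for i in range(len(tab))' with tab[i]: fold over pyRange, indexing via pyGetD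
-- (every i is in range, so pyGetD equals Python's tab[i] exactly).
def recherche_indices_classement (value : Int) (tab : List Int) : List Int × List Int × List Int :=
  (PySem.List.pyRange 0 (tab.length : Int) 1).foldl
    (fun (s : List Int × List Int × List Int) i =>
      let x := PySem.List.pyGetD tab i 0
      if x < value then (s.1 ++ [i], s.2.1, s.2.2)
      else if x = value then (s.1, s.2.1 ++ [i], s.2.2)
      else (s.1, s.2.1, s.2.2 ++ [i]))
    ([], [], [])

-- ===== PORT B =====
-- three comprehensions over enumerate(tab): a comprehension is filterMap
def recherche_indices_classement_alt (value : Int) (tab : List Int) : List Int × List Int × List Int :=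
  ((PySem.List.enumerate tab 0).filterMap (fun p => if p.2 < value then some p.1 else none),
   (PySem.List.enumerate tab 0).filterMap (fun p => if p.2 = value then some p.1 else none),
   (PySem.List.enumerate tab 0).filterMap (fun p => if p.2 > value then some p.1 else none))

-- ===== PRECONDITION & SPEC =====
def Spec_recherche_indices_classement (value : Int) (tab : List Int) (out : List Int × List Int × List Int) : Prop := out = recherche_indices_classement_alt value tab
instance (value : Int) (tab : List Int) (out : List Int × List Int × List Int) : Decidable (Spec_recherche_indices_classement value tab out) := by unfold Spec_recherche_indices_classement; infer_instance

-- ===== CLAIM (what is proved, stated in full; the proofs are below) =====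
def Claim_equal_recherche_indices_classement : Prop := ∀ (value : Int) (tab : List Int), Dom_recherche_indices_classement value tab → Spec_recherche_indices_classement value tab (recherche_indices_classement value tab)

-- ===== LEMMAS AND PROOFS =====

-- A's loop, read over enumerate: the fold distributes into three filterMaps.
theorem pv_fold_key (value : Int) (l : List (Int × Int)) (a b c : List Int) :
    l.foldl
      (fun (s : List Int × List Int × List Int) (p : Int × Int) =>
        if p.2 < value then (s.1 ++ [p.1], s.2.1, s.2.2)
        else if p.2 = value then (s.1, s.2.1 ++ [p.1], s.2.2)
        else (s.1, s.2.1, s.2.2 ++ [p.1]))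
      (a, b, c)
    = (a ++ l.filterMap (fun p => if p.2 < value then some p.1 else none),
       b ++ l.filterMap (fun p => if p.2 = value then some p.1 else none),
       c ++ l.filterMap (fun p => if p.2 > value then some p.1 else none)) := by
  induction l generalizing a b c with
  | nil => simp
  | cons p l ih =>
    rcases p with ⟨i, x⟩
    by_cases h1 : x < value
    · have h2 : ¬ x = value := by omega
      have h3 : ¬ x > value := by omega
      simp [List.foldl_cons, h1, h2, h3, ih]
    · by_cases h2 : x = value
      · simp [List.foldl_cons, h2, ih]
      · have h3 : x > value := by omega
        simp [List.foldl_cons, h1, h2, h3, ih]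

-- ===== VERDICT (by name: the statement is the Claim_ definition above) =====
theorem recherche_indices_classement_spec : Claim_equal_recherche_indices_classement := by
  intro value tab _
  unfold Spec_recherche_indices_classement recherche_indices_classement recherche_indices_classement_alt
  have he : PySem.List.enumerate tab 0 =
      (PySem.List.pyRange 0 (tab.length : Int) 1).map (fun j => (j, PySem.List.pyGetD tab j 0)) := by
    simpa using PySem.List.enumerate_eq_map_pyRange tab 0
  have hA : (PySem.List.pyRange 0 (tab.length : Int) 1).foldl
      (fun (s : List Int × List Int × List Int) i =>
        let x := PySem.List.pyGetD tab i 0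
        if x < value then (s.1 ++ [i], s.2.1, s.2.2)
        else if x = value then (s.1, s.2.1 ++ [i], s.2.2)
        else (s.1, s.2.1, s.2.2 ++ [i]))
      ([], [], [])
      = (PySem.List.enumerate tab 0).foldl
        (fun (s : List Int × List Int × List Int) (p : Int × Int) =>
          if p.2 < value then (s.1 ++ [p.1], s.2.1, s.2.2)
          else if p.2 = value then (s.1, s.2.1 ++ [p.1], s.2.2)
          else (s.1, s.2.1, s.2.2 ++ [p.1]))
        ([], [], []) := by
    rw [he, List.foldl_map]
  rw [hA, pv_fold_key]
  simp
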